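-- pv_equiv track=rewrite | github.com/EderSouza01/ChallengeCCR | challenge.py | construir_grafo
-- ===== SOURCE A (Python) =====
-- def construir_grafo(metro):
--     estacoes_das_linhas = {}
--
--     for linha, estacoes in metro.items():
--         for i in range(len(estacoes)):
--             if estacoes[i] not in estacoes_das_linhas:
--                 estacoes_das_linhas[estacoes[i]] = []
--             # Conectando a estação com as adjacentes
--             if i > 0:
--                 estacoes_das_linhas[estacoes[i]].append(estacoes[i - 1])
--             if i < len(estacoes) - 1:
--                 estacoes_das_linhas[estacoes[i]].append(estacoes[i + 1])
--
--     return estacoes_das_linhas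
-- ===== SOURCE B (Python) =====
-- def construir_grafo(metro):
--     # Gather formulation: instead of scattering edges into a mutable dict while
--     # scanning, compute each station's whole adjacency list directly.
--     linhas = list(metro.values())
--     ordem = list(dict.fromkeys(s for est in linhas for s in est))
--
--     def vizinhos(s):
--         return [n
--                 for est in linhas
--                 for a, b in zip(est, est[1:])
--                 for n in (([b] if a == s else []) + ([a] if b == s else []))]
--
--     return {s: vizinhos(s) for s in ordem}
-- ===== Notes on version B (the rewrite author's own statement) =====
-- stated objective: alternative
-- what changed: A scatters: one indexed scan mutating a dict of lists, appending est[i-1]/est[i+1] to each station's entry as it walks; B gathers: it first dedups all stations into key order (dict.fromkeys) and then computes each station's whole adjacency list independently by rescanning the consecutive pairs of every line, with no dict mutation at all.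
import Mathlib
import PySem

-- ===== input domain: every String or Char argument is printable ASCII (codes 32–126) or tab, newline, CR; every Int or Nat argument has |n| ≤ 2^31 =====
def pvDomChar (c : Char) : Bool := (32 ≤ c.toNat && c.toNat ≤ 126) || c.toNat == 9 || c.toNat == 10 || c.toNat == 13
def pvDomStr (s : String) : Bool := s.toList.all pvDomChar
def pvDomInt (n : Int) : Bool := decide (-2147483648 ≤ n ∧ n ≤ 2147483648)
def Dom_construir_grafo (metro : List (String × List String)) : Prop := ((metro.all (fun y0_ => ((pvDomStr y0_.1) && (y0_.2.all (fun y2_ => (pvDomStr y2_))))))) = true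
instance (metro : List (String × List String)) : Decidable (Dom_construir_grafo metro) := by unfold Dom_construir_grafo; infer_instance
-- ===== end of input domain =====

-- A scatters edges into a mutable dict during one indexed scan; B gathers: it dedups the
-- stations into key order and computes each station's whole adjacency list independently
-- by rescanning the consecutive pairs of every line (alternative algorithm, no dict mutation).

-- ===== PORT A =====
-- one iteration of A's inner `for i in range(len(estacoes))` loop
def cgStep (est : List String) (d : PySem.Dict String (List String)) (i : Int) :
    PySem.Dict String (List String) :=
  let s := PySem.List.pyGetD est i ""
  let d1 := if d.contains s then d else d.insert s []
  let d2 := if 0 < i then d1.modify s [] (· ++ [PySem.List.pyGetD est (i - 1) ""]) else d1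
  if i < (est.length : Int) - 1 then d2.modify s [] (· ++ [PySem.List.pyGetD est (i + 1) ""]) else d2

def construir_grafo (metro : List (String × List String)) : List (String × List String) :=
  (metro.foldl
    (fun d p => (PySem.List.pyRange 0 (p.2.length : Int)).foldl (cgStep p.2) d)
    PySem.Dict.empty).items

-- ===== PORT B =====
-- Source B's `vizinhos(s)`: gather s's neighbours by rescanning the consecutive pairs of every line
def vizinhosB (linhas : List (List String)) (s : String) : List String :=
  linhas.flatMap (fun est =>
    (est.zip (PySem.List.slice est (some 1) none)).flatMap (fun ab =>
      (if ab.1 == s then [ab.2] else []) ++ (if ab.2 == s then [ab.1] else [])))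

def construir_grafo_alt (metro : List (String × List String)) : List (String × List String) :=
  let linhas := metro.map (·.2)
  let ordem := PySem.List.dedup (linhas.flatMap (fun est => est))
  ordem.map (fun s => (s, vizinhosB linhas s))

-- ===== PRECONDITION & SPEC =====
def Spec_construir_grafo (metro : List (String × List String)) (out : List (String × List String)) : Prop := out = construir_grafo_alt metro
instance (metro : List (String × List String)) (out : List (String × List String)) : Decidable (Spec_construir_grafo metro out) := by unfold Spec_construir_grafo; infer_instance

-- ===== CLAIM (what is proved, stated in full; the proofs are below) =====
def Claim_equal_construir_grafo : Prop := ∀ (metro : List (String × List String)), Dom_construir_grafo metro → Spec_construir_grafo metro (construir_grafo metro)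

-- ===== LEMMAS AND PROOFS =====

-- proof-only abbreviation: append `x` to key `k`'s adjacency list
def modApp (k x : String) (d : PySem.Dict String (List String)) : PySem.Dict String (List String) :=
  d.modify k [] (· ++ [x])

-- proof-only helpers: the optional prev-append and next-append of one iteration of A
def prvApp (p : Option String) (s : String) (d : PySem.Dict String (List String)) :
    PySem.Dict String (List String) :=
  match p with | some q => modApp s q d | none => d

def nxtApp (rest : List String) (s : String) (d : PySem.Dict String (List String)) :
    PySem.Dict String (List String) :=
  match rest with | t :: _ => modApp s t d | [] => d

-- index-free recursion equivalent to A's inner loop: carry the previous station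
def goA (d : PySem.Dict String (List String)) (p : Option String) :
    List String → PySem.Dict String (List String)
  | [] => d
  | s :: rest => goA (nxtApp rest s (prvApp p s (d.setdefault s []))) (some s) rest

-- the (key, appended value) operations A performs on one line, in order
def opsA (p : Option String) : List String → List (String × String)
  | [] => []
  | s :: rest =>
    (match p with | some q => [(s, q)] | none => []) ++
    (match rest with | t :: _ => [(s, t)] | [] => []) ++ opsA (some s) rest

-- the same operations read off the consecutive pairs
def opsPairs (est : List String) : List (String × String) :=
  (est.zip (est.drop 1)).flatMap (fun ab => [(ab.1, ab.2), (ab.2, ab.1)])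

-- A's "if s not in d: d[s] = []" IS setdefault
lemma cond_insert_eq_setdefault (d : PySem.Dict String (List String)) (s : String) :
    (if d.contains s then d else d.insert s []) = d.setdefault s [] := by
  by_cases h : d.contains s = true
  · simp [h, PySem.Dict.setdefault_of_contains d _ h]
  · simp only [Bool.not_eq_true] at h
    simp [h, PySem.Dict.setdefault_of_not_contains d _ h]

lemma getD_append_left (l r : List String) (n : Nat) (hn : n < l.length) :
    (l ++ r).getD n "" = l.getD n "" := by
  unfold List.getD
  rw [List.getElem?_append_left hn]

lemma getD_append_right (l r : List String) (n : Nat) (hn : l.length ≤ n) :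
    (l ++ r).getD n "" = r.getD (n - l.length) "" := by
  unfold List.getD
  rw [List.getElem?_append_right hn]

-- closed form of one iteration of A's loop at position done.length
lemma cgStep_closed (done : List String) (s : String) (rest : List String)
    (d : PySem.Dict String (List String)) :
    cgStep (done ++ s :: rest) d (done.length : Int)
      = nxtApp rest s (prvApp done.getLast? s (d.setdefault s [])) := by
  have hs : PySem.List.pyGetD (done ++ s :: rest) (done.length : Int) "" = s := by
    rw [PySem.List.pyGetD_of_nonneg _ _ (by positivity)]
    rw [Int.toNat_natCast, getD_append_right done (s :: rest) done.length (le_refl _)]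
    simp [List.getD]
  have hprev : done ≠ [] →
      PySem.List.pyGetD (done ++ s :: rest) ((done.length : Int) - 1) ""
        = (done.getLast?).getD "" := by
    intro hne
    rw [PySem.List.pyGetD_of_nonneg _ _ (by have := List.length_pos_iff.mpr hne; omega)]
    have htn : (((done.length : Int)) - 1).toNat = done.length - 1 := by omega
    rw [htn, getD_append_left _ _ _ (by have := List.length_pos_iff.mpr hne; omega)]
    rw [List.getLast?_eq_some_getLast hne, List.getLast_eq_getElem hne]
    simp only [List.getD, Option.getD_some]
    rw [List.getElem?_eq_getElem (by have := List.length_pos_iff.mpr hne; omega)]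
    simp
  have hnext : ∀ (t : String) (rs : List String), rest = t :: rs →
      PySem.List.pyGetD (done ++ s :: rest) ((done.length : Int) + 1) "" = t := by
    intro t rs hr
    subst hr
    rw [PySem.List.pyGetD_of_nonneg _ _ (by positivity)]
    have htn : (((done.length : Int)) + 1).toNat = done.length + 1 := by omega
    rw [htn, getD_append_right _ _ _ (by omega)]
    simp [List.getD]
  unfold cgStep
  simp only [hs, cond_insert_eq_setdefault]
  cases rest with
  | nil =>
    have hc : ¬ ((done.length : Int) < ((done ++ [s]).length : Int) - 1) := by simp
    simp only [hc, if_false]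
    cases done with
    | nil => rfl
    | cons a as =>
      have hpos : (0 : Int) < ((a :: as).length : Int) := by simp
      simp only [hpos, if_true, hprev (by simp)]
      rw [List.getLast?_eq_some_getLast (by simp : (a :: as) ≠ [])]
      rfl
  | cons t rs =>
    have hc : (done.length : Int) < ((done ++ s :: t :: rs).length : Int) - 1 := by simp; omega
    simp only [hc, if_true, hnext t rs rfl]
    cases done with
    | nil => rfl
    | cons a as =>
      have hpos : (0 : Int) < ((a :: as).length : Int) := by simp
      simp only [hpos, if_true, hprev (by simp)]
      rw [List.getLast?_eq_some_getLast (by simp : (a :: as) ≠ [])]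
      rfl

-- A's indexed loop, started at position done.length of done ++ todo, is goA
lemma foldIdx_eq_goA (todo done : List String) (d : PySem.Dict String (List String)) :
    (PySem.List.pyRange (done.length : Int) ((done.length + todo.length : Nat) : Int)).foldl
        (cgStep (done ++ todo)) d
      = goA d done.getLast? todo := by
  induction todo generalizing done d with
  | nil => simp [PySem.List.pyRange, goA]
  | cons s rest ih =>
    have hlt : (done.length : Int) < ((done.length + (s :: rest).length : Nat) : Int) := by
      simp
    rw [PySem.List.pyRange_one_cons hlt, List.foldl_cons, cgStep_closed]
    have hb : ((done.length + (s :: rest).length : Nat) : Int)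
        = (((done ++ [s]).length + rest.length : Nat) : Int) := by simp; omega
    have ha : (done.length : Int) + 1 = ((done ++ [s]).length : Int) := by simp
    rw [ha, hb]
    have hrec := ih (done ++ [s]) (nxtApp rest s (prvApp done.getLast? s (d.setdefault s [])))
    rw [List.append_assoc] at hrec
    simp only [List.cons_append, List.nil_append] at hrec
    rw [hrec, List.getLast?_concat]
    rfl

-- keys are untouched by an append to a present key
lemma keys_modApp (k x : String) (d : PySem.Dict String (List String))
    (hk : d.contains k = true) : (modApp k x d).keys = d.keys := by
  unfold modApp
  rw [PySem.Dict.keys_modify, PySem.Dict.keys_insert_of_contains d _ hk]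

lemma keys_prvApp (p : Option String) (s : String) (d : PySem.Dict String (List String))
    (hs : d.contains s = true) : (prvApp p s d).keys = d.keys := by
  cases p with
  | none => rfl
  | some q => exact keys_modApp s q d hs

lemma keys_nxtApp (rest : List String) (s : String) (d : PySem.Dict String (List String))
    (hs : d.contains s = true) : (nxtApp rest s d).keys = d.keys := by
  cases rest with
  | nil => rfl
  | cons t _ => exact keys_modApp s t d hs

lemma contains_prvApp (p : Option String) (s k : String) (d : PySem.Dict String (List String))
    (hk : d.contains k = true) : (prvApp p s d).contains k = true := by
  cases p with
  | none => exact hk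
  | some q => simp [prvApp, modApp, PySem.Dict.contains_modify, hk]

-- setdefault s [] on the keys IS PySem.Set.add
lemma keys_setdefault_nil (d : PySem.Dict String (List String)) (s : String) :
    (d.setdefault s ([] : List String)).keys = PySem.Set.add d.keys s := by
  rw [PySem.Dict.keys_setdefault, PySem.Dict.contains_eq_decide_mem_keys]
  simp [PySem.Set.add]

-- the keys after one line of A: the line's stations are added to the key set in order
lemma keys_goA (est : List String) (p : Option String) (d : PySem.Dict String (List String)) :
    (goA d p est).keys = PySem.Set.update d.keys est := by
  induction est generalizing p d with
  | nil => rfl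
  | cons s rest ih =>
    show (goA (nxtApp rest s (prvApp p s (d.setdefault s []))) (some s) rest).keys = _
    have hsd : (d.setdefault s ([] : List String)).contains s = true := by
      simp [PySem.Dict.contains_setdefault]
    rw [ih, keys_nxtApp _ _ _ (contains_prvApp p s s _ hsd), keys_prvApp _ _ _ hsd,
      keys_setdefault_nil]
    rfl

-- getD · [] through setdefault s [] is unchanged
lemma getD_setdefault_nil (d : PySem.Dict String (List String)) (s k : String) :
    (d.setdefault s ([] : List String)).getD k [] = d.getD k [] := by
  by_cases h : k = s
  · subst h; exact PySem.Dict.getD_setdefault_self d k [] []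
  · rw [PySem.Dict.getD_eq_get?_getD, PySem.Dict.get?_setdefault_of_ne d ([] : List String) h,
      ← PySem.Dict.getD_eq_get?_getD]

lemma getD_modApp (s x k : String) (d : PySem.Dict String (List String)) :
    (modApp s x d).getD k [] = d.getD k [] ++ (if s == k then [x] else []) := by
  unfold modApp
  rw [PySem.Dict.getD_modify]
  by_cases h : k = s
  · subst h; simp
  · rw [if_neg h, if_neg (by simpa [beq_iff_eq] using fun hh : s = k => h hh.symm),
      List.append_nil]

-- the non-recursive appends of one goA step
def hdOps (p : Option String) (s : String) (rest : List String) : List (String × String) :=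
  (match p with | some q => [(s, q)] | none => []) ++
  (match rest with | t :: _ => [(s, t)] | [] => [])

-- the value at k after one line of A: the appends A performs there, filtered to key k
lemma getD_goA (est : List String) (p : Option String) (d : PySem.Dict String (List String))
    (k : String) :
    (goA d p est).getD k []
      = d.getD k [] ++ ((opsA p est).filter (fun q => q.1 == k)).map (·.2) := by
  induction est generalizing p d with
  | nil => simp [goA, opsA]
  | cons s rest ih =>
    show (goA (nxtApp rest s (prvApp p s (d.setdefault s []))) (some s) rest).getD k [] = _
    rw [ih]
    have hbase : (nxtApp rest s (prvApp p s (d.setdefault s []))).getD k []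
        = d.getD k [] ++ ((hdOps p s rest).filter (fun q => q.1 == k)).map (·.2) := by
      cases p with
      | none =>
        cases rest with
        | nil => simpa [hdOps] using getD_setdefault_nil d s k
        | cons t rs =>
          show (modApp s t (d.setdefault s [])).getD k [] = _
          rw [getD_modApp, getD_setdefault_nil]
          by_cases h : (s == k) = true <;> simp [hdOps, h]
      | some q =>
        cases rest with
        | nil =>
          show (modApp s q (d.setdefault s [])).getD k [] = _
          rw [getD_modApp, getD_setdefault_nil]
          by_cases h : (s == k) = true <;> simp [hdOps, h]
        | cons t rs =>
          show (modApp s t (modApp s q (d.setdefault s []))).getD k [] = _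
          rw [getD_modApp, getD_modApp, getD_setdefault_nil]
          by_cases h : (s == k) = true <;> simp [hdOps, h]
    rw [hbase]
    rw [show opsA p (s :: rest) = hdOps p s rest ++ opsA (some s) rest from rfl]
    simp [List.filter_append, List.append_assoc]

-- opsA with no pending previous station IS the pair reading
lemma opsA_eq_opsPairs (est : List String) (p : Option String) :
    opsA p est
      = (match p, est with | some q, s :: _ => [(s, q)] | _, _ => []) ++ opsPairs est := by
  induction est generalizing p with
  | nil => cases p <;> rfl
  | cons s rest ih =>
    cases rest with
    | nil => cases p <;> rfl
    | cons t rs =>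
      show (match p with | some q => [(s, q)] | none => []) ++ [(s, t)] ++ opsA (some s) (t :: rs)
          = _
      rw [ih (some s)]
      cases p <;> simp [opsPairs, List.zip_cons_cons, List.flatMap_cons]

lemma opsA_none_eq (est : List String) : opsA none est = opsPairs est := by
  rw [opsA_eq_opsPairs est none]
  cases est <;> rfl

-- filtered-at-k pair operations are B's per-line gather
lemma filter_opsPairs (est : List String) (k : String) :
    ((opsPairs est).filter (fun q => q.1 == k)).map (·.2)
      = (est.zip (est.drop 1)).flatMap (fun ab =>
          (if ab.1 == k then [ab.2] else []) ++ (if ab.2 == k then [ab.1] else [])) := by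
  unfold opsPairs
  induction est.zip (est.drop 1) with
  | nil => rfl
  | cons ab ps ih =>
    simp only [List.flatMap_cons, List.filter_append, List.map_append, ih]
    congr 1
    by_cases h1 : ab.1 == k <;> by_cases h2 : ab.2 == k <;> simp [List.filter, h1, h2]

-- the whole of A's fold: its keys and its value at every key
lemma keys_A_fold (metro : List (String × List String)) (d : PySem.Dict String (List String)) :
    (metro.foldl
        (fun d p => (PySem.List.pyRange 0 (p.2.length : Int)).foldl (cgStep p.2) d) d).keys
      = PySem.Set.update d.keys (metro.flatMap (·.2)) := by
  induction metro generalizing d with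
  | nil => rfl
  | cons l rest ih =>
    simp only [List.foldl_cons, List.flatMap_cons]
    have h0 := foldIdx_eq_goA l.2 [] d
    simp only [List.length_nil, List.nil_append, List.getLast?_nil, Nat.zero_add] at h0
    rw [show ((0 : Nat) : Int) = (0 : Int) from rfl] at h0
    rw [h0, ih, keys_goA]
    simp [PySem.Set.update, List.foldl_append]

lemma getD_A_fold (metro : List (String × List String)) (d : PySem.Dict String (List String))
    (k : String) :
    (metro.foldl
        (fun d p => (PySem.List.pyRange 0 (p.2.length : Int)).foldl (cgStep p.2) d) d).getD k []
      = d.getD k []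
        ++ metro.flatMap (fun p => ((opsA none p.2).filter (fun q => q.1 == k)).map (·.2)) := by
  induction metro generalizing d with
  | nil => simp
  | cons l rest ih =>
    simp only [List.foldl_cons, List.flatMap_cons]
    have h0 := foldIdx_eq_goA l.2 [] d
    simp only [List.length_nil, List.nil_append, List.getLast?_nil, Nat.zero_add] at h0
    rw [show ((0 : Nat) : Int) = (0 : Int) from rfl] at h0
    rw [h0, ih, getD_goA, List.append_assoc]

-- ===== VERDICT (by name: the statement is the Claim_ definition above) =====
theorem construir_grafo_spec : Claim_equal_construir_grafo := by
  intro metro _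
  show construir_grafo metro = construir_grafo_alt metro
  unfold construir_grafo construir_grafo_alt
  have hkeys := keys_A_fold metro PySem.Dict.empty
  rw [PySem.Dict.keys_empty] at hkeys
  have hflat : (metro.map (·.2)).flatMap (fun est => est) = metro.flatMap (·.2) := by
    rw [List.flatMap_map]
  have hnd : (metro.foldl
      (fun d p => (PySem.List.pyRange 0 (p.2.length : Int)).foldl (cgStep p.2) d)
      PySem.Dict.empty).keys.Nodup := by
    rw [hkeys]
    exact PySem.Set.nodup_ofList _
  rw [PySem.Dict.items_eq_map_keys _ hnd ([] : List String), hkeys]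
  show _ = ((PySem.List.dedup ((metro.map (·.2)).flatMap (fun est => est))).map
      (fun s => (s, vizinhosB (metro.map (·.2)) s)))
  rw [PySem.List.dedup_eq_ofList, hflat]
  show (PySem.Set.update ([] : PySem.Set String) (metro.flatMap (·.2))).map _
      = (PySem.Set.ofList (metro.flatMap (·.2))).map _
  rw [show PySem.Set.update ([] : PySem.Set String) (metro.flatMap (·.2))
      = PySem.Set.ofList (metro.flatMap (·.2)) from (PySem.Set.ofList_eq_foldl _).symm]
  apply List.map_congr_left
  intro k _
  rw [getD_A_fold, PySem.Dict.getD_empty, List.nil_append]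
  unfold vizinhosB
  rw [List.flatMap_map]
  have hline : (fun (p : String × List String) =>
        ((opsA none p.2).filter (fun q => q.1 == k)).map (·.2))
      = fun (p : String × List String) =>
          (p.2.zip (PySem.List.slice p.2 (some 1))).flatMap
            (fun ab => (if ab.1 == k then [ab.2] else []) ++ (if ab.2 == k then [ab.1] else [])) := by
    funext p
    rw [PySem.List.slice_from p.2 (by norm_num : (0:Int) ≤ 1), opsA_none_eq p.2]
    exact filter_opsPairs p.2 k
  rw [hline]
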